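-- pv_equiv track=rewrite | github.com/andreaskeis77/capsule | src/web_dashboard_support.py | parse_ids_param
-- ===== SOURCE A (Python) =====
-- from typing import Any, Dict, List, Mapping, Optional, Tuple
--
-- def parse_ids_param(raw: Optional[str], limit: int = 500) -> List[int]:
--     """Parse ?ids=101,102,... into an ordered unique list of positive ints."""
--     if not raw:
--         return []
--     raw = raw.strip()
--     if not raw:
--         return []
--
--     parts = [part.strip() for part in raw.split(",")]
--     out: List[int] = []
--     seen: set[int] = set()
--     for part in parts:
--         if not part:
--             continue
--         try:
--             number = int(part)
--         except ValueError:
--             continue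
--         if number <= 0 or number in seen:
--             continue
--         seen.add(number)
--         out.append(number)
--         if len(out) >= limit:
--             break
--     return out
-- ===== SOURCE B (Python) =====
-- from typing import Dict, List, Optional
--
--
-- def parse_ids_param(raw: Optional[str], limit: int = 500) -> List[int]:
--     """Parse ?ids=101,102,... into an ordered unique list of positive ints."""
--     if limit <= 0 or not raw:
--         return []
--     tokens = [t.strip() for t in raw.strip().split(",")]
--     first_at: Dict[int, int] = {}
--     for pos, token in enumerate(tokens):
--         try:
--             n = int(token)
--         except ValueError:
--             continue
--         if n > 0:
--             first_at.setdefault(n, pos)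
--     ordered = sorted(first_at, key=first_at.get)
--     return ordered[:limit]
-- ===== Notes on version B (the rewrite author's own statement) =====
-- stated objective: alternative
-- what changed: B replaces A's sequential accumulation (seen-set, ordered output list, early break on the limit) by a dict mapping each positive id to its first position, then sorts the ids by that position and slices to the limit.
-- intended difference: For limit <= 0 with at least one valid positive id in raw, A still returns the first id (it checks the limit only after appending), while B returns [], the intended result of asking for at most zero ids. — e.g. on parse_ids_param(some "5", 0): A returns [5], B returns []
import Mathlib
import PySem

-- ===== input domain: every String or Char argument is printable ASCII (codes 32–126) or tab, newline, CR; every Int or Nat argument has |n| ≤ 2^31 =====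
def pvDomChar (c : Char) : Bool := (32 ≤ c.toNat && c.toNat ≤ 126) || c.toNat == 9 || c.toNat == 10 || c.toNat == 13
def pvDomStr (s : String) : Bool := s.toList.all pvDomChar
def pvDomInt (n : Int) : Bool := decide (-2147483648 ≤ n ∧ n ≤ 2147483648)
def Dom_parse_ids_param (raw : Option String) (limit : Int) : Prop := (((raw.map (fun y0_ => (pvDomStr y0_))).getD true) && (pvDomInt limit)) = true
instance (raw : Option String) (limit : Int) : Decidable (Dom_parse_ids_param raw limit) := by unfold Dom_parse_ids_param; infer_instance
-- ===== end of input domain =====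

-- B maps each positive id to its first position in one pass and then orders ids by sorting on
-- that position, instead of A's sequential seen-set/output accumulation with an early break;
-- on limit ≤ 0 B returns [] where A still returns one id (see D_ below).

-- ===== PORT A =====
-- [part.strip() for part in s.split(",")] — the tokenization both programs perform
def pvTokens (s : String) : List String :=
  ((PySem.Str.split? s ",").getD []).map PySem.Str.strip

-- the for-loop of A: state (out, seen), break when len(out) >= limit after appending
def pvLoopA (limit : Int) : List String → List Int → PySem.Set Int → List Int
  | [], out, _ => out
  | part :: rest, out, seen =>
    if part = "" then pvLoopA limit rest out seen
    else
      match PySem.Int.ofStr? part with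
      | none => pvLoopA limit rest out seen
      | some number =>
        if number ≤ 0 ∨ PySem.Set.contains seen number = true then pvLoopA limit rest out seen
        else
          let seen' := PySem.Set.add seen number
          let out' := out ++ [number]
          if limit ≤ PySem.List.len out' then out'
          else pvLoopA limit rest out' seen'

def parse_ids_param (raw : Option String) (limit : Int) : List Int :=
  match raw with
  | none => []
  | some r =>
    if r = "" then []
    else
      let r' := PySem.Str.strip r
      if r' = "" then []
      else
        let parts := pvTokens r'
        pvLoopA limit parts [] PySem.Set.empty

-- ===== PORT B =====
-- loop body of B: record the first position of each positive id (try/except int → ofStr?)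
def pvStepB (d : PySem.Dict Int Int) (pt : Int × String) : PySem.Dict Int Int :=
  match PySem.Int.ofStr? pt.2 with
  | none => d
  | some n => if 0 < n then d.setdefault n pt.1 else d

def parse_ids_param_alt (raw : Option String) (limit : Int) : List Int :=
  if limit ≤ 0 ∨ raw.getD "" = "" then []
  else
    let tokens := pvTokens (PySem.Str.strip (raw.getD ""))
    let first_at := (PySem.List.enumerate tokens 0).foldl pvStepB PySem.Dict.empty
    -- key=first_at.get: every sorted element is a key of first_at, so .get is its stored position (getD is exact here)
    let ordered := PySem.List.sorted first_at.keys (fun k => first_at.getD k 0) false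
    PySem.List.slice ordered none (some limit)

-- ===== PRECONDITION & SPEC =====
-- token test used only to state D_: the token parses as an int > 0
def pvHasPos (t : String) : Bool :=
  decide (0 < (PySem.Int.ofStr? t).getD 0)

-- A checks the limit only AFTER appending, so for limit ≤ 0 it still returns the first valid id;
-- B returns [], the intended value: a non-positive limit asks for no ids.
def D_parse_ids_param (raw : Option String) (limit : Int) : Prop :=
  limit ≤ 0 ∧ (pvTokens (PySem.Str.strip (raw.getD ""))).any pvHasPos = true
instance (raw : Option String) (limit : Int) : Decidable (D_parse_ids_param raw limit) := by unfold D_parse_ids_param; infer_instance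

def Spec_parse_ids_param (raw : Option String) (limit : Int) (out : List Int) : Prop := ¬ D_parse_ids_param raw limit → out = parse_ids_param_alt raw limit
instance (raw : Option String) (limit : Int) (out : List Int) : Decidable (Spec_parse_ids_param raw limit out) := by unfold Spec_parse_ids_param; infer_instance

def pvDiffWitness_parse_ids_param : Option String × Int := (some "5", 0)
def pvDiffWitnessOut_parse_ids_param : (List Int) × (List Int) := ([5], [])

-- ===== CLAIM (what is proved, stated in full; the proofs are below) =====
def Claim_unchanged_parse_ids_param : Prop := ∀ (raw : Option String) (limit : Int), Dom_parse_ids_param raw limit → Spec_parse_ids_param raw limit (parse_ids_param raw limit)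
def Claim_changed_parse_ids_param : Prop := Dom_parse_ids_param (pvDiffWitness_parse_ids_param.1) (pvDiffWitness_parse_ids_param.2) ∧ D_parse_ids_param (pvDiffWitness_parse_ids_param.1) (pvDiffWitness_parse_ids_param.2) ∧ parse_ids_param (pvDiffWitness_parse_ids_param.1) (pvDiffWitness_parse_ids_param.2) = pvDiffWitnessOut_parse_ids_param.1 ∧ parse_ids_param_alt (pvDiffWitness_parse_ids_param.1) (pvDiffWitness_parse_ids_param.2) = pvDiffWitnessOut_parse_ids_param.2 ∧ pvDiffWitnessOut_parse_ids_param.1 ≠ pvDiffWitnessOut_parse_ids_param.2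
def Claim_exact_parse_ids_param : Prop := ∀ (raw : Option String) (limit : Int), Dom_parse_ids_param raw limit → D_parse_ids_param raw limit → parse_ids_param raw limit ≠ parse_ids_param_alt raw limit

-- ===== LEMMAS AND PROOFS =====

theorem pvOfStrEmpty : PySem.Int.ofStr? "" = none := by decide
theorem pvStripEmpty : PySem.Str.strip "" = "" := by decide
theorem pvTokEmpty : pvTokens "" = [""] := by decide

-- ordered dedup of the ids A's loop would still append given `seen`
def pvDed (seen : List Int) : List String → List Int
  | [] => []
  | t :: ts =>
    match PySem.Int.ofStr? t with
    | none => pvDed seen ts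
    | some n =>
      if n ≤ 0 ∨ n ∈ seen then pvDed seen ts
      else n :: pvDed (seen ++ [n]) ts

theorem pvDed_skip_empty (seen : List Int) (ts : List String) :
    pvDed seen ("" :: ts) = pvDed seen ts := by
  simp [pvDed, pvOfStrEmpty]

theorem pvDed_skip_none (seen : List Int) (t : String) (ts : List String)
    (hofs : PySem.Int.ofStr? t = none) : pvDed seen (t :: ts) = pvDed seen ts := by
  simp [pvDed, hofs]

theorem pvDed_skip_bad (seen : List Int) (t : String) (ts : List String) {n : Int}
    (hofs : PySem.Int.ofStr? t = some n) (hsk : n ≤ 0 ∨ n ∈ seen) :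
    pvDed seen (t :: ts) = pvDed seen ts := by
  rcases hsk with h | h <;> simp [pvDed, hofs, h]

theorem pvDed_cons (seen : List Int) (t : String) (ts : List String) {n : Int}
    (hofs : PySem.Int.ofStr? t = some n) (hn : ¬ n ≤ 0) (hm : n ∉ seen) :
    pvDed seen (t :: ts) = n :: pvDed (seen ++ [n]) ts := by
  simp [pvDed, hofs, hn, hm]

-- one-step equations for A's loop
theorem pvLoopA_skip_empty (limit : Int) (ts : List String) (out : List Int) (seen : PySem.Set Int) :
    pvLoopA limit ("" :: ts) out seen = pvLoopA limit ts out seen := by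
  simp [pvLoopA]

theorem pvLoopA_skip_none (limit : Int) (t : String) (ts : List String) (out : List Int)
    (seen : PySem.Set Int) (he : t ≠ "") (hofs : PySem.Int.ofStr? t = none) :
    pvLoopA limit (t :: ts) out seen = pvLoopA limit ts out seen := by
  simp [pvLoopA, he, hofs]

theorem pvLoopA_skip_bad (limit : Int) (t : String) (ts : List String) (out : List Int)
    (seen : PySem.Set Int) (he : t ≠ "") {n : Int}
    (hofs : PySem.Int.ofStr? t = some n) (hsk : n ≤ 0 ∨ n ∈ seen) :
    pvLoopA limit (t :: ts) out seen = pvLoopA limit ts out seen := by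
  rcases hsk with h | h <;> simp [pvLoopA, he, hofs, h]

theorem pvLoopA_good (limit : Int) (t : String) (ts : List String) (out : List Int)
    (seen : PySem.Set Int) (he : t ≠ "") {n : Int}
    (hofs : PySem.Int.ofStr? t = some n) (hn : ¬ n ≤ 0) (hm : n ∉ seen) :
    pvLoopA limit (t :: ts) out seen =
      if limit ≤ (out.length : Int) + 1 then out ++ [n]
      else pvLoopA limit ts (out ++ [n]) (PySem.Set.add seen n) := by
  simp [pvLoopA, he, hofs, hn, hm, PySem.List.len]

theorem pvLoop_eq (limit : Int) (ts : List String) (out : List Int) (seen : PySem.Set Int)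
    (h : out.length < (max limit 1).toNat) :
    pvLoopA limit ts out seen = out ++ (pvDed seen ts).take ((max limit 1).toNat - out.length) := by
  induction ts generalizing out seen with
  | nil => simp [pvLoopA, pvDed]
  | cons t ts ih =>
    by_cases he : t = ""
    · subst he
      rw [pvLoopA_skip_empty, pvDed_skip_empty]
      exact ih out seen h
    · cases hofs : PySem.Int.ofStr? t with
      | none =>
        rw [pvLoopA_skip_none limit t ts out seen he hofs, pvDed_skip_none seen t ts hofs]
        exact ih out seen h
      | some n =>
        by_cases hsk : n ≤ 0 ∨ n ∈ seen
        · rw [pvLoopA_skip_bad limit t ts out seen he hofs hsk, pvDed_skip_bad seen t ts hofs hsk]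
          exact ih out seen h
        · obtain ⟨hn, hm⟩ := not_or.mp hsk
          rw [pvLoopA_good limit t ts out seen he hofs hn hm, pvDed_cons seen t ts hofs hn hm]
          by_cases hbrk : limit ≤ (out.length : Int) + 1
          · rw [if_pos hbrk, show (max limit 1).toNat - out.length = 1 from by omega]
            simp
          · rw [if_neg hbrk, PySem.Set.add_of_not_mem hm,
              ih (out ++ [n]) (seen ++ [n]) (by simp only [List.length_append, List.length_singleton]; omega),
              show (max limit 1).toNat - out.length = ((max limit 1).toNat - (out.length + 1)) + 1 from by omega]
            simp [List.take_succ_cons]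

-- if no token is a positive int, A's loop appends nothing
theorem pvLoopA_id (limit : Int) (ts : List String) (out : List Int) (seen : PySem.Set Int)
    (h : ∀ t ∈ ts, pvHasPos t = false) :
    pvLoopA limit ts out seen = out := by
  induction ts generalizing out seen with
  | nil => rfl
  | cons t ts ih =>
    have ht := h t (by simp)
    have htl : ∀ t' ∈ ts, pvHasPos t' = false := fun t' h' => h t' (by simp [h'])
    by_cases he : t = ""
    · subst he; rw [pvLoopA_skip_empty]; exact ih out seen htl
    · cases hofs : PySem.Int.ofStr? t with
      | none => rw [pvLoopA_skip_none limit t ts out seen he hofs]; exact ih out seen htl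
      | some n =>
        have hn : ¬ 0 < n := by simpa [pvHasPos, hofs] using ht
        rw [pvLoopA_skip_bad limit t ts out seen he hofs (Or.inl (by omega))]
        exact ih out seen htl

-- every recursive call of A's loop only extends out
theorem pvLoopA_prefix (limit : Int) (ts : List String) (out : List Int) (seen : PySem.Set Int) :
    ∃ r, pvLoopA limit ts out seen = out ++ r := by
  induction ts generalizing out seen with
  | nil => exact ⟨[], by simp [pvLoopA]⟩
  | cons t ts ih =>
    by_cases he : t = ""
    · subst he; rw [pvLoopA_skip_empty]; exact ih out seen
    · cases hofs : PySem.Int.ofStr? t with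
      | none => rw [pvLoopA_skip_none limit t ts out seen he hofs]; exact ih out seen
      | some n =>
        by_cases hsk : n ≤ 0 ∨ n ∈ seen
        · rw [pvLoopA_skip_bad limit t ts out seen he hofs hsk]; exact ih out seen
        · obtain ⟨hn, hm⟩ := not_or.mp hsk
          rw [pvLoopA_good limit t ts out seen he hofs hn hm]
          by_cases hbrk : limit ≤ (out.length : Int) + 1
          · exact ⟨[n], by rw [if_pos hbrk]⟩
          · rw [if_neg hbrk]
            obtain ⟨r, hr⟩ := ih (out ++ [n]) (PySem.Set.add seen n)
            exact ⟨n :: r, by simpa using hr⟩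

-- if some token is a positive int, A's loop (from empty state) returns a nonempty list
theorem pvLoopA_ne_nil (limit : Int) (ts : List String)
    (h : ts.any pvHasPos = true) :
    pvLoopA limit ts [] PySem.Set.empty ≠ [] := by
  induction ts with
  | nil => simp at h
  | cons t ts ih =>
    by_cases hp : pvHasPos t = true
    · have he : t ≠ "" := by
        intro hteq; subst hteq; exact absurd hp (by decide)
      cases hofs : PySem.Int.ofStr? t with
      | none => simp [pvHasPos, hofs] at hp
      | some n =>
        have hn : 0 < n := by simpa [pvHasPos, hofs] using hp
        have hm : n ∉ (PySem.Set.empty : PySem.Set Int) := by simp [PySem.Set.empty]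
        rw [pvLoopA_good limit t ts [] PySem.Set.empty he hofs (by omega) hm]
        by_cases hbrk : limit ≤ (([] : List Int).length : Int) + 1
        · rw [if_pos hbrk]; simp
        · rw [if_neg hbrk]
          obtain ⟨r, hr⟩ := pvLoopA_prefix limit ts (([] : List Int) ++ [n]) (PySem.Set.add PySem.Set.empty n)
          rw [hr]; simp
    · have htl : ts.any pvHasPos = true := by
        rcases List.any_eq_true.mp h with ⟨x, hx, hpx⟩
        rcases List.mem_cons.mp hx with hx | hx
        · exact absurd (hx ▸ hpx) hp
        · exact List.any_eq_true.mpr ⟨x, hx, hpx⟩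
      by_cases he : t = ""
      · subst he; rw [pvLoopA_skip_empty]; exact ih htl
      · cases hofs : PySem.Int.ofStr? t with
        | none => rw [pvLoopA_skip_none limit t ts [] PySem.Set.empty he hofs]; exact ih htl
        | some n =>
          have hn : ¬ 0 < n := by simpa [pvHasPos, hofs] using hp
          rw [pvLoopA_skip_bad limit t ts [] PySem.Set.empty he hofs (Or.inl (by omega))]
          exact ih htl

-- (id, first position) pairs B's loop inserts, in token order, starting at position i
def pvPairs : Int → List String → List (Int × Int)
  | _, [] => []
  | i, t :: ts =>
    match PySem.Int.ofStr? t with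
    | some n => if 0 < n then (n, i) :: pvPairs (i + 1) ts else pvPairs (i + 1) ts
    | none => pvPairs (i + 1) ts

theorem pvPairs_skip (i : Int) (t : String) (ts : List String)
    (h : ∀ n : Int, PySem.Int.ofStr? t = some n → ¬ 0 < n) :
    pvPairs i (t :: ts) = pvPairs (i + 1) ts := by
  cases hofs : PySem.Int.ofStr? t with
  | none => simp [pvPairs, hofs]
  | some n => simp [pvPairs, hofs, h n hofs]

theorem pvPairs_cons (i : Int) (t : String) (ts : List String) {n : Int}
    (hofs : PySem.Int.ofStr? t = some n) (hn : 0 < n) :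
    pvPairs i (t :: ts) = (n, i) :: pvPairs (i + 1) ts := by
  simp [pvPairs, hofs, hn]

theorem pvFoldB_eq_pairs (ts : List String) (i : Int) (d : PySem.Dict Int Int) :
    (PySem.List.enumerate ts i).foldl pvStepB d
      = (pvPairs i ts).foldl (fun d p => d.setdefault p.1 p.2) d := by
  induction ts generalizing i d with
  | nil => simp [PySem.List.enumerate_nil, pvPairs]
  | cons t ts ih =>
    rw [PySem.List.enumerate_cons]
    simp only [List.foldl_cons]
    cases hofs : PySem.Int.ofStr? t with
    | none =>
      rw [show pvStepB d (i, t) = d from by simp [pvStepB, hofs],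
        pvPairs_skip i t ts (by intro n h; rw [hofs] at h; exact absurd h (by simp))]
      exact ih (i + 1) d
    | some n =>
      by_cases hn : 0 < n
      · rw [show pvStepB d (i, t) = d.setdefault n i from by simp [pvStepB, hofs, hn],
          pvPairs_cons i t ts hofs hn]
        simp only [List.foldl_cons]
        exact ih (i + 1) _
      · rw [show pvStepB d (i, t) = d from by simp [pvStepB, hofs, hn],
          pvPairs_skip i t ts (by intro m h; rw [hofs] at h; injection h with h'; subst h'; omega)]
        exact ih (i + 1) d

-- first pair per key, keys already in `seen` skipped
def pvFirst : List Int → List (Int × Int) → List (Int × Int)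
  | _, [] => []
  | seen, p :: ps => if p.1 ∈ seen then pvFirst seen ps else p :: pvFirst (seen ++ [p.1]) ps

theorem pvFoldSd (ps : List (Int × Int)) (d : PySem.Dict Int Int) (h : d.keys.Nodup) :
    (ps.foldl (fun d p => d.setdefault p.1 p.2) d).items = d.items ++ pvFirst d.keys ps := by
  induction ps generalizing d with
  | nil => simp [pvFirst]
  | cons p ps ih =>
    simp only [List.foldl_cons, pvFirst]
    by_cases hm : p.1 ∈ d.keys
    · have hc : d.contains p.1 = true := (PySem.Dict.contains_iff_mem_keys d p.1).mpr hm
      rw [if_pos hm, PySem.Dict.setdefault_of_contains d p.2 hc, ih d h]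
    · have hc : d.contains p.1 = false := by
        cases hcc : d.contains p.1 with
        | false => rfl
        | true => exact absurd ((PySem.Dict.contains_iff_mem_keys d p.1).mp hcc) hm
      have hnd' : (d.insert p.1 p.2).keys.Nodup := by
        rw [PySem.Dict.keys_insert_of_not_contains d p.2 hc]
        refine List.Nodup.append h (List.nodup_singleton _) ?_
        intro a ha hb
        exact hm ((List.mem_singleton.mp hb) ▸ ha)
      rw [if_neg hm, PySem.Dict.setdefault_of_not_contains d p.2 hc, ih (d.insert p.1 p.2) hnd',
        PySem.Dict.items_insert_of_not_contains d p.2 hc, PySem.Dict.keys_insert_of_not_contains d p.2 hc]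
      simp

theorem pvFirst_fst_eq_pvDed (ts : List String) (seen : List Int) (i : Int) :
    (pvFirst seen (pvPairs i ts)).map Prod.fst = pvDed seen ts := by
  induction ts generalizing seen i with
  | nil => simp [pvPairs, pvFirst, pvDed]
  | cons t ts ih =>
    cases hofs : PySem.Int.ofStr? t with
    | none =>
      by_cases he : t = ""
      · subst he
        rw [pvPairs_skip i "" ts (by intro m h; rw [pvOfStrEmpty] at h; exact absurd h (by simp)),
          pvDed_skip_empty]
        exact ih seen (i + 1)
      · rw [pvPairs_skip i t ts (by intro m h; rw [hofs] at h; exact absurd h (by simp)),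
          pvDed_skip_none seen t ts hofs]
        exact ih seen (i + 1)
    | some n =>
      by_cases hn : 0 < n
      · rw [pvPairs_cons i t ts hofs hn]
        by_cases hm : n ∈ seen
        · rw [show pvFirst seen ((n, i) :: pvPairs (i + 1) ts) = pvFirst seen (pvPairs (i + 1) ts)
              from by simp [pvFirst, hm],
            pvDed_skip_bad seen t ts hofs (Or.inr hm)]
          exact ih seen (i + 1)
        · rw [show pvFirst seen ((n, i) :: pvPairs (i + 1) ts)
                = (n, i) :: pvFirst (seen ++ [n]) (pvPairs (i + 1) ts)
              from by simp [pvFirst, hm],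
            pvDed_cons seen t ts hofs (by omega) hm]
          simp only [List.map_cons]
          exact congrArg (n :: ·) (ih (seen ++ [n]) (i + 1))
      · rw [pvPairs_skip i t ts (by intro m h; rw [hofs] at h; injection h with h'; subst h'; omega),
          pvDed_skip_bad seen t ts hofs (Or.inl (by omega))]
        exact ih seen (i + 1)

-- ids produced by pvFirst are distinct and avoid `seen`
theorem pvFirst_nodup (ps : List (Int × Int)) (seen : List Int) :
    ((pvFirst seen ps).map Prod.fst).Nodup ∧ ∀ x ∈ (pvFirst seen ps).map Prod.fst, x ∉ seen := by
  induction ps generalizing seen with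
  | nil => simp [pvFirst]
  | cons p ps ih =>
    simp only [pvFirst]
    by_cases hm : p.1 ∈ seen
    · rw [if_pos hm]; exact ih seen
    · rw [if_neg hm]
      obtain ⟨h1, h2⟩ := ih (seen ++ [p.1])
      refine ⟨?_, ?_⟩
      · simp only [List.map_cons, List.nodup_cons]
        exact ⟨fun hc => (h2 _ hc) (by simp), h1⟩
      · intro x hx
        simp only [List.map_cons, List.mem_cons] at hx
        rcases hx with hx | hx
        · exact hx ▸ hm
        · intro hs; exact (h2 x hx) (by simp [hs])

theorem pvFirst_sublist (ps : List (Int × Int)) (seen : List Int) :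
    (pvFirst seen ps).Sublist ps := by
  induction ps generalizing seen with
  | nil => simp [pvFirst]
  | cons p ps ih =>
    simp only [pvFirst]
    by_cases hm : p.1 ∈ seen
    · rw [if_pos hm]; exact (ih seen).cons p
    · rw [if_neg hm]; exact (ih (seen ++ [p.1])).cons₂ p

-- positions in pvPairs are strictly increasing
theorem pvPairs_lb (ts : List String) (i : Int) : ∀ p ∈ pvPairs i ts, i ≤ p.2 := by
  induction ts generalizing i with
  | nil => simp [pvPairs]
  | cons t ts ih =>
    intro p hp
    cases hofs : PySem.Int.ofStr? t with
    | none =>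
      rw [pvPairs_skip i t ts (by intro m h; rw [hofs] at h; exact absurd h (by simp))] at hp
      have := ih (i + 1) p hp; omega
    | some n =>
      by_cases hn : 0 < n
      · rw [pvPairs_cons i t ts hofs hn] at hp
        rcases List.mem_cons.mp hp with hp | hp
        · subst hp; simp
        · have := ih (i + 1) p hp; omega
      · rw [pvPairs_skip i t ts (by intro m h; rw [hofs] at h; injection h with h'; subst h'; omega)] at hp
        have := ih (i + 1) p hp; omega

theorem pvPairs_pairwise (ts : List String) (i : Int) :
    (pvPairs i ts).Pairwise (fun p q => p.2 < q.2) := by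
  induction ts generalizing i with
  | nil => simp [pvPairs]
  | cons t ts ih =>
    cases hofs : PySem.Int.ofStr? t with
    | none =>
      rw [pvPairs_skip i t ts (by intro m h; rw [hofs] at h; exact absurd h (by simp))]
      exact ih (i + 1)
    | some n =>
      by_cases hn : 0 < n
      · rw [pvPairs_cons i t ts hofs hn]
        refine List.pairwise_cons.mpr ⟨?_, ih (i + 1)⟩
        intro q hq
        have := pvPairs_lb ts (i + 1) q hq
        simp only; omega
      · rw [pvPairs_skip i t ts (by intro m h; rw [hofs] at h; injection h with h'; subst h'; omega)]
        exact ih (i + 1)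

-- B's whole pipeline (tokens already stripped) computes the ordered dedup, then takes `limit`
theorem pvAltCore (ts : List String) (limit : Int) (hl : 0 < limit) :
    (PySem.List.slice
      (PySem.List.sorted ((PySem.List.enumerate ts 0).foldl pvStepB PySem.Dict.empty).keys
        (fun k => ((PySem.List.enumerate ts 0).foldl pvStepB PySem.Dict.empty).getD k 0) false)
      none (some limit))
    = (pvDed [] ts).take limit.toNat := by
  set d := (PySem.List.enumerate ts 0).foldl pvStepB PySem.Dict.empty with hd
  have hitems : d.items = pvFirst [] (pvPairs 0 ts) := by
    rw [hd, pvFoldB_eq_pairs]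
    have := pvFoldSd (pvPairs 0 ts) PySem.Dict.empty (by simp [PySem.Dict.keys_empty])
    simpa [PySem.Dict.keys_empty] using this
  have hkeysitems : d.keys = d.items.map Prod.fst := rfl
  have hkeys : d.keys = pvDed [] ts := by
    rw [hkeysitems, hitems]
    exact pvFirst_fst_eq_pvDed ts [] 0
  have hnd : d.keys.Nodup := by
    rw [hkeysitems, hitems]
    exact (pvFirst_nodup (pvPairs 0 ts) []).1
  have hpw_items : d.items.Pairwise (fun p q => p.2 < q.2) := by
    rw [hitems]
    exact (pvPairs_pairwise ts 0).sublist (pvFirst_sublist (pvPairs 0 ts) [])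
  have hsorted : PySem.List.sorted d.keys (fun k => d.getD k 0) false = d.keys := by
    apply PySem.List.sorted_eq_self_of_pairwise
    rw [hkeysitems, List.pairwise_map]
    refine List.Pairwise.imp_of_mem ?_ hpw_items
    intro p q hp hq hlt
    obtain ⟨pk, pv⟩ := p
    obtain ⟨qk, qv⟩ := q
    rw [PySem.Dict.getD_of_mem_items d hp hnd 0, PySem.Dict.getD_of_mem_items d hq hnd 0]
    exact le_of_lt hlt
  rw [hsorted, hkeys, PySem.List.slice_to _ (by omega : (0:Int) ≤ limit)]

-- A on a string whose strip is empty returns []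
theorem pvA_strip_empty (r : String) (limit : Int) (hs : PySem.Str.strip r = "") :
    parse_ids_param (some r) limit = [] := by
  by_cases hr : r = ""
  · subst hr; simp [parse_ids_param]
  · simp [parse_ids_param, hr, hs]

-- A on a nonempty-strip string is its loop over the stripped tokens
theorem pvA_main (r : String) (limit : Int) (hr : r ≠ "") (hs : PySem.Str.strip r ≠ "") :
    parse_ids_param (some r) limit
      = pvLoopA limit (pvTokens (PySem.Str.strip r))
          [] PySem.Set.empty := by
  simp [parse_ids_param, hr, hs]

-- B's guard is false for positive limit and nonempty raw
theorem pvB_main (r : String) (limit : Int) (hl : 0 < limit) (hr : r ≠ "") :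
    parse_ids_param_alt (some r) limit
      = (pvDed [] (pvTokens (PySem.Str.strip r))).take
          limit.toNat := by
  rw [show parse_ids_param_alt (some r) limit
      = PySem.List.slice
          (PySem.List.sorted
            ((PySem.List.enumerate
                (pvTokens (PySem.Str.strip r)) 0).foldl
              pvStepB PySem.Dict.empty).keys
            (fun k =>
              ((PySem.List.enumerate
                  (pvTokens (PySem.Str.strip r)) 0).foldl
                pvStepB PySem.Dict.empty).getD k 0) false)
          none (some limit) from by
    simp only [parse_ids_param_alt, Option.getD_some]
    have hg : ¬ (limit ≤ 0 ∨ r = "") := by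
      rintro (h | h)
      · omega
      · exact hr h
    rw [if_neg hg]]
  exact pvAltCore _ limit hl

-- ===== VERDICT (by name: the statement is the Claim_ definition above) =====
theorem parse_ids_param_spec : Claim_unchanged_parse_ids_param := by
  intro raw limit _
  intro hnd
  unfold D_parse_ids_param at hnd
  by_cases hl : 0 < limit
  · -- limit positive: A's early-break take equals B's sort-by-first-position take
    cases raw with
    | none => simp [parse_ids_param, parse_ids_param_alt]
    | some r =>
      by_cases hr : r = ""
      · subst hr
        simp [parse_ids_param, parse_ids_param_alt]
      · by_cases hs : PySem.Str.strip r = ""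
        · rw [pvA_strip_empty r limit hs, pvB_main r limit hl hr, hs, pvTokEmpty]
          simp [pvDed, pvOfStrEmpty]
        · rw [pvA_main r limit hr hs, pvB_main r limit hl hr,
            pvLoop_eq limit _ [] PySem.Set.empty (by simp only [List.length_nil]; omega)]
          have hmax : (max limit 1).toNat = limit.toNat := by omega
          rw [hmax]
          rw [show (PySem.Set.empty : PySem.Set Int) = ([] : List Int) from rfl]
          simp
  · -- limit ≤ 0 outside D_: no token is a positive id, both sides are []
    have hl' : limit ≤ 0 := by omega
    have hany : ¬ ((pvTokens (PySem.Str.strip (raw.getD ""))).any pvHasPos = true) := fun ha => hnd ⟨hl', ha⟩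
    have hB : parse_ids_param_alt raw limit = [] := by
      simp only [parse_ids_param_alt]
      rw [if_pos (Or.inl hl')]
    rw [hB]
    cases raw with
    | none => simp [parse_ids_param]
    | some r =>
      simp only [Option.getD_some] at hany
      by_cases hs : PySem.Str.strip r = ""
      · exact pvA_strip_empty r limit hs
      · by_cases hr : r = ""
        · exact absurd (hr ▸ pvStripEmpty) hs
        · rw [pvA_main r limit hr hs]
          apply pvLoopA_id
          intro t ht
          cases hpt : pvHasPos t with
          | false => rfl
          | true => exact absurd (List.any_eq_true.mpr ⟨t, ht, hpt⟩) hany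

theorem parse_ids_param_changed : Claim_changed_parse_ids_param := by
  unfold Claim_changed_parse_ids_param; decide

theorem parse_ids_param_tight : Claim_exact_parse_ids_param := by
  intro raw limit _ hd
  obtain ⟨hl, hany⟩ := hd
  have hB : parse_ids_param_alt raw limit = [] := by
    simp only [parse_ids_param_alt]
    rw [if_pos (Or.inl hl)]
  rw [hB]
  cases raw with
  | none =>
    exfalso
    simp only [Option.getD_none] at hany
    rw [pvStripEmpty, pvTokEmpty] at hany
    exact absurd hany (by decide)
  | some r =>
    simp only [Option.getD_some] at hany
    by_cases hs : PySem.Str.strip r = ""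
    · exfalso
      rw [hs, pvTokEmpty] at hany
      exact absurd hany (by decide)
    · by_cases hr : r = ""
      · exact absurd (hr ▸ pvStripEmpty) hs
      · rw [pvA_main r limit hr hs]
        exact pvLoopA_ne_nil limit _ hany
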